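-- pv_equiv track=rewrite | github.com/pashov/skills | x-ray/scripts/generate_svg.py | line_rect_intersects
-- ===== SOURCE A (Python) =====
-- def _segments_intersect(ax1, ay1, ax2, ay2, bx1, by1, bx2, by2):
--     def cross(o, a, b):
--         return (a[0] - o[0]) * (b[1] - o[1]) - (a[1] - o[1]) * (b[0] - o[0])
--     def on_seg(p, q, r):
--         return (min(p[0], r[0]) <= q[0] <= max(p[0], r[0]) and
--                 min(p[1], r[1]) <= q[1] <= max(p[1], r[1]))
--     p1, p2, p3, p4 = (ax1,ay1),(ax2,ay2),(bx1,by1),(bx2,by2)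
--     d1 = cross(p3,p4,p1); d2 = cross(p3,p4,p2)
--     d3 = cross(p1,p2,p3); d4 = cross(p1,p2,p4)
--     if ((d1>0 and d2<0) or (d1<0 and d2>0)) and \
--        ((d3>0 and d4<0) or (d3<0 and d4>0)):
--         return True
--     if d1==0 and on_seg(p3,p1,p4): return True
--     if d2==0 and on_seg(p3,p2,p4): return True
--     if d3==0 and on_seg(p1,p3,p2): return True
--     if d4==0 and on_seg(p1,p4,p2): return True
--     return False
--
-- def line_rect_intersects(x1, y1, x2, y2, rx, ry, rw, rh, pad=3):
--     rx -= pad; ry -= pad; rw += 2*pad; rh += 2*pad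
--     if rx <= x1 <= rx+rw and ry <= y1 <= ry+rh: return True
--     if rx <= x2 <= rx+rw and ry <= y2 <= ry+rh: return True
--     edges = [(rx,ry,rx+rw,ry),(rx,ry+rh,rx+rw,ry+rh),
--              (rx,ry,rx,ry+rh),(rx+rw,ry,rx+rw,ry+rh)]
--     for ex1,ey1,ex2,ey2 in edges:
--         if _segments_intersect(x1,y1,x2,y2,ex1,ey1,ex2,ey2):
--             return True
--     return False
-- ===== SOURCE B (Python) =====
-- def line_rect_intersects(x1, y1, x2, y2, rx, ry, rw, rh, pad=3):
--     # Separating-axis test (bbox overlap on x and y + rect corners not strictly on one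
--     # side of the segment's line) instead of A's per-edge CLRS segment-intersection tests.
--     rx -= pad; ry -= pad; rw += 2 * pad; rh += 2 * pad
--     xl, xh = rx, rx + rw
--     yl, yh = ry, ry + rh
--     if max(x1, x2) < xl or min(x1, x2) > xh:
--         return False
--     if max(y1, y2) < yl or min(y1, y2) > yh:
--         return False
--     dx = x2 - x1
--     dy = y2 - y1
--     s = [dx * (cy - y1) - dy * (cx - x1)
--          for cx in (xl, xh) for cy in (yl, yh)]
--     return not (all(v > 0 for v in s) or all(v < 0 for v in s))
-- ===== Notes on version B (the rewrite author's own statement) =====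
-- stated objective: alternative
-- what changed: Replaced the per-edge CLRS segment-segment intersection tests (cross products + collinear on-segment checks for each of the four rectangle edges) with a single separating-axis test: x/y bounding-interval overlap plus a check that the four rectangle corners do not lie strictly on one side of the segment's line.
-- outside the precondition, e.g. on line_rect_intersects(2, 6, -8, -1, -3, -3, -4, 2, -4): A returns True, B returns False
import Mathlib
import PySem

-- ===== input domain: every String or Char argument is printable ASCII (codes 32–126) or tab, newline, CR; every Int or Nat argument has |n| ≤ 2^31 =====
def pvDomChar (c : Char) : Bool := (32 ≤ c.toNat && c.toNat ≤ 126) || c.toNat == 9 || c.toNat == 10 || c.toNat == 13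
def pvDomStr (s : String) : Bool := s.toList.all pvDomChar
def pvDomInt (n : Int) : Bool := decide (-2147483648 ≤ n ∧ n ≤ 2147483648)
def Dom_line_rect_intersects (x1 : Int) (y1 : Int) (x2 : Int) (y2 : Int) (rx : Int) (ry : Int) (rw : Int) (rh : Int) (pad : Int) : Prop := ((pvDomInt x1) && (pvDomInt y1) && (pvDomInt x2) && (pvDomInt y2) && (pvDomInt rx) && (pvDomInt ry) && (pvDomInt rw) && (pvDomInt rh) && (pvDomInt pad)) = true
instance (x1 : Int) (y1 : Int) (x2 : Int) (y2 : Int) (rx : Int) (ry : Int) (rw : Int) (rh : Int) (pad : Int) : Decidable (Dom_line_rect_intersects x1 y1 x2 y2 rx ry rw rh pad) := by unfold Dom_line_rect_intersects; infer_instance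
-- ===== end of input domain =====

-- B replaces A's four per-edge CLRS segment-intersection tests by a separating-axis test
-- (bounding-interval overlap on x and y, plus "the rectangle corners are not strictly on
-- one side of the segment's line"); same exact integer answer on non-inverted rectangles.

-- ===== PORT A =====
def pvCross (o a b : Int × Int) : Int :=
  (a.1 - o.1) * (b.2 - o.2) - (a.2 - o.2) * (b.1 - o.1)

def pvOnSeg (p q r : Int × Int) : Bool :=
  decide (min p.1 r.1 ≤ q.1 ∧ q.1 ≤ max p.1 r.1 ∧ min p.2 r.2 ≤ q.2 ∧ q.2 ≤ max p.2 r.2)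

def segments_intersect (ax1 ay1 ax2 ay2 bx1 by1 bx2 by2 : Int) : Bool :=
  let p1 := (ax1, ay1); let p2 := (ax2, ay2); let p3 := (bx1, by1); let p4 := (bx2, by2)
  let d1 := pvCross p3 p4 p1
  let d2 := pvCross p3 p4 p2
  let d3 := pvCross p1 p2 p3
  let d4 := pvCross p1 p2 p4
  if ((d1 > 0 ∧ d2 < 0) ∨ (d1 < 0 ∧ d2 > 0)) ∧ ((d3 > 0 ∧ d4 < 0) ∨ (d3 < 0 ∧ d4 > 0)) then true
  else if d1 = 0 ∧ pvOnSeg p3 p1 p4 then true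
  else if d2 = 0 ∧ pvOnSeg p3 p2 p4 then true
  else if d3 = 0 ∧ pvOnSeg p1 p3 p2 then true
  else if d4 = 0 ∧ pvOnSeg p1 p4 p2 then true
  else false

def line_rect_intersects (x1 : Int) (y1 : Int) (x2 : Int) (y2 : Int) (rx : Int) (ry : Int) (rw : Int) (rh : Int) (pad : Int) : Bool :=
  let rx := rx - pad
  let ry := ry - pad
  let rw := rw + 2 * pad
  let rh := rh + 2 * pad
  if rx ≤ x1 ∧ x1 ≤ rx + rw ∧ ry ≤ y1 ∧ y1 ≤ ry + rh then true
  else if rx ≤ x2 ∧ x2 ≤ rx + rw ∧ ry ≤ y2 ∧ y2 ≤ ry + rh then true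
  else
    let edges := [(rx, ry, rx + rw, ry), (rx, ry + rh, rx + rw, ry + rh),
                  (rx, ry, rx, ry + rh), (rx + rw, ry, rx + rw, ry + rh)]
    edges.any (fun e => segments_intersect x1 y1 x2 y2 e.1 e.2.1 e.2.2.1 e.2.2.2)

-- ===== PORT B =====
def line_rect_intersects_alt (x1 : Int) (y1 : Int) (x2 : Int) (y2 : Int) (rx : Int) (ry : Int) (rw : Int) (rh : Int) (pad : Int) : Bool :=
  let rx := rx - pad
  let ry := ry - pad
  let rw := rw + 2 * pad
  let rh := rh + 2 * pad
  let xl := rx; let xh := rx + rw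
  let yl := ry; let yh := ry + rh
  if max x1 x2 < xl ∨ min x1 x2 > xh then false
  else if max y1 y2 < yl ∨ min y1 y2 > yh then false
  else
    let dx := x2 - x1
    let dy := y2 - y1
    let s := [(xl, yl), (xl, yh), (xh, yl), (xh, yh)].map
      (fun c => dx * (c.2 - y1) - dy * (c.1 - x1))
    !(s.all (fun v => decide (v > 0)) || s.all (fun v => decide (v < 0)))

-- ===== PRECONDITION & SPEC =====
-- Pre_ excludes inverted padded rectangles (negative effective width or height), where A's
-- answer — only boundary hits of the inverted box count, containment never does — is an
-- accident of its per-edge implementation.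
def Pre_line_rect_intersects (x1 : Int) (y1 : Int) (x2 : Int) (y2 : Int) (rx : Int) (ry : Int) (rw : Int) (rh : Int) (pad : Int) : Prop :=
  0 ≤ rw + 2 * pad ∧ 0 ≤ rh + 2 * pad
instance (x1 : Int) (y1 : Int) (x2 : Int) (y2 : Int) (rx : Int) (ry : Int) (rw : Int) (rh : Int) (pad : Int) : Decidable (Pre_line_rect_intersects x1 y1 x2 y2 rx ry rw rh pad) := by unfold Pre_line_rect_intersects; infer_instance

def pvWitness_line_rect_intersects : Int × Int × Int × Int × Int × Int × Int × Int × Int :=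
  (0, 0, 10, 10, 2, 2, 3, 3, 3)

def Spec_line_rect_intersects (x1 : Int) (y1 : Int) (x2 : Int) (y2 : Int) (rx : Int) (ry : Int) (rw : Int) (rh : Int) (pad : Int) (out : Bool) : Prop := out = line_rect_intersects_alt x1 y1 x2 y2 rx ry rw rh pad
instance (x1 : Int) (y1 : Int) (x2 : Int) (y2 : Int) (rx : Int) (ry : Int) (rw : Int) (rh : Int) (pad : Int) (out : Bool) : Decidable (Spec_line_rect_intersects x1 y1 x2 y2 rx ry rw rh pad out) := by unfold Spec_line_rect_intersects; infer_instance

-- ===== CLAIM (what is proved, stated in full; the proofs are below) =====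
def Claim_equal_line_rect_intersects : Prop := ∀ (x1 : Int) (y1 : Int) (x2 : Int) (y2 : Int) (rx : Int) (ry : Int) (rw : Int) (rh : Int) (pad : Int), Dom_line_rect_intersects x1 y1 x2 y2 rx ry rw rh pad → Pre_line_rect_intersects x1 y1 x2 y2 rx ry rw rh pad → Spec_line_rect_intersects x1 y1 x2 y2 rx ry rw rh pad (line_rect_intersects x1 y1 x2 y2 rx ry rw rh pad)

-- ===== LEMMAS AND PROOFS =====

-- The segment parametrised over ℚ: σ(t) = (x1 + t·(x2-x1), y1 + t·(y2-y1)).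
-- MeetH x1 y1 x2 y2 e lo hi: the segment meets the horizontal segment y = e, lo ≤ x ≤ hi.
def MeetH (x1 y1 x2 y2 e lo hi : Int) : Prop :=
  ∃ t : ℚ, 0 ≤ t ∧ t ≤ 1 ∧ (y1 : ℚ) + t * ((y2 : ℚ) - y1) = e ∧
    (lo : ℚ) ≤ (x1 : ℚ) + t * ((x2 : ℚ) - x1) ∧ (x1 : ℚ) + t * ((x2 : ℚ) - x1) ≤ hi

def InBox (x y xl yl xh yh : Int) : Prop := xl ≤ x ∧ x ≤ xh ∧ yl ≤ y ∧ y ≤ yh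

-- The common geometric characterisation both programs are proved equivalent to.
def KProp (x1 y1 x2 y2 xl yl xh yh : Int) : Prop :=
  InBox x1 y1 xl yl xh yh ∨ InBox x2 y2 xl yl xh yh ∨
  MeetH x1 y1 x2 y2 yl xl xh ∨ MeetH x1 y1 x2 y2 yh xl xh ∨
  MeetH y1 x1 y2 x2 xl yl yh ∨ MeetH y1 x1 y2 x2 xh yl yh

theorem unit_between {u v : ℚ} {t : ℚ} (h0 : 0 ≤ t) (h1 : t ≤ 1) :
    min u v ≤ u + t * (v - u) ∧ u + t * (v - u) ≤ max u v := by
  constructor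
  · rcases le_total u v with h | h
    · rw [min_eq_left h]; nlinarith
    · rw [min_eq_right h]; nlinarith
  · rcases le_total u v with h | h
    · rw [max_eq_right h]; nlinarith
    · rw [max_eq_left h]; nlinarith

theorem pairflip (p q r s : Int) :
    ((p - q > 0 ∧ r - s < 0) ∨ (p - q < 0 ∧ r - s > 0)) ↔
    ((q - p > 0 ∧ s - r < 0) ∨ (q - p < 0 ∧ s - r > 0)) := by
  omega

theorem zflip (u v : Int) {P Q R S : Prop} :
    (u - v = 0 ∧ P ∧ Q ∧ R ∧ S) ↔ (v - u = 0 ∧ R ∧ S ∧ P ∧ Q) := by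
  constructor <;> rintro ⟨h, p, q, r, s⟩ <;> exact ⟨by omega, r, s, p, q⟩

theorem ite_chain_congr (c1 c2 c3 c4 c5 d1 d2 d3 d4 d5 : Prop)
    [Decidable c1] [Decidable c2] [Decidable c3] [Decidable c4] [Decidable c5]
    [Decidable d1] [Decidable d2] [Decidable d3] [Decidable d4] [Decidable d5]
    (e1 : c1 ↔ d1) (e2 : c2 ↔ d2) (e3 : c3 ↔ d3) (e4 : c4 ↔ d4) (e5 : c5 ↔ d5) :
    (if c1 then true else if c2 then true else if c3 then true else
      if c4 then true else if c5 then true else false) =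
    (if d1 then true else if d2 then true else if d3 then true else
      if d4 then true else if d5 then true else false) := by
  by_cases h1 : c1 <;> by_cases h2 : c2 <;> by_cases h3 : c3 <;> by_cases h4 : c4 <;>
    by_cases h5 : c5 <;>
    simp [h1, h2, h3, h4, h5, ← e1, ← e2, ← e3, ← e4, ← e5]

theorem segInt_swap (ax1 ay1 ax2 ay2 bx1 by1 bx2 by2 : Int) :
    segments_intersect ax1 ay1 ax2 ay2 bx1 by1 bx2 by2 =
    segments_intersect ay1 ax1 ay2 ax2 by1 bx1 by2 bx2 := by
  simp only [segments_intersect, pvCross, pvOnSeg, decide_eq_true_eq]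
  exact ite_chain_congr _ _ _ _ _ _ _ _ _ _
    (and_congr
      (pairflip ((bx2 - bx1) * (ay1 - by1)) ((by2 - by1) * (ax1 - bx1))
        ((bx2 - bx1) * (ay2 - by1)) ((by2 - by1) * (ax2 - bx1)))
      (pairflip ((ax2 - ax1) * (by1 - ay1)) ((ay2 - ay1) * (bx1 - ax1))
        ((ax2 - ax1) * (by2 - ay1)) ((ay2 - ay1) * (bx2 - ax1))))
    (zflip ((bx2 - bx1) * (ay1 - by1)) ((by2 - by1) * (ax1 - bx1)))
    (zflip ((bx2 - bx1) * (ay2 - by1)) ((by2 - by1) * (ax2 - bx1)))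
    (zflip ((ax2 - ax1) * (by1 - ay1)) ((ay2 - ay1) * (bx1 - ax1)))
    (zflip ((ax2 - ax1) * (by2 - ay1)) ((ay2 - ay1) * (bx2 - ax1)))

theorem collinear_param (x1 y1 x2 y2 cx cy : Int)
    (hcol : (x2 - x1) * (cy - y1) = (y2 - y1) * (cx - x1))
    (hx1 : min x1 x2 ≤ cx) (hx2 : cx ≤ max x1 x2)
    (hy1 : min y1 y2 ≤ cy) (hy2 : cy ≤ max y1 y2) :
    ∃ t : ℚ, 0 ≤ t ∧ t ≤ 1 ∧ (x1 : ℚ) + t * ((x2 : ℚ) - x1) = cx ∧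
      (y1 : ℚ) + t * ((y2 : ℚ) - y1) = cy := by
  by_cases hdx : x2 = x1
  · have hcx : cx = x1 := by omega
    by_cases hdy : y2 = y1
    · have hcy : cy = y1 := by omega
      refine ⟨0, le_refl _, zero_le_one, ?_, ?_⟩
      · rw [hcx]; ring
      · rw [hcy]; ring
    · have hdyq : ((y2 : ℚ) - y1) ≠ 0 := fun hh => hdy (by exact_mod_cast sub_eq_zero.mp hh)
      refine ⟨((cy : ℚ) - y1) / ((y2 : ℚ) - y1), ?_, ?_, ?_, ?_⟩
      · rcases le_total y1 y2 with h | h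
        · have h1 : (y1 : ℚ) ≤ cy := by exact_mod_cast (by omega : y1 ≤ cy)
          have h2 : (y1 : ℚ) < y2 := by
            exact_mod_cast lt_of_le_of_ne h (fun hh => hdy hh.symm)
          exact div_nonneg (by linarith) (by linarith)
        · have h1 : (cy : ℚ) ≤ y1 := by exact_mod_cast (by omega : cy ≤ y1)
          have h2 : (y2 : ℚ) < y1 := by
            exact_mod_cast lt_of_le_of_ne h hdy
          rw [show ((cy : ℚ) - y1) / ((y2 : ℚ) - y1) = ((y1 : ℚ) - cy) / ((y1 : ℚ) - y2) from by
            rw [← neg_div_neg_eq]; ring_nf]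
          exact div_nonneg (by linarith) (by linarith)
      · rcases le_total y1 y2 with h | h
        · have h1 : (cy : ℚ) ≤ y2 := by exact_mod_cast (by omega : cy ≤ y2)
          have h2 : (y1 : ℚ) < y2 := by
            exact_mod_cast lt_of_le_of_ne h (fun hh => hdy hh.symm)
          rw [div_le_one (by linarith)]; linarith
        · have h1 : (y2 : ℚ) ≤ cy := by exact_mod_cast (by omega : y2 ≤ cy)
          have h2 : (y2 : ℚ) < y1 := by
            exact_mod_cast lt_of_le_of_ne h hdy
          rw [show ((cy : ℚ) - y1) / ((y2 : ℚ) - y1) = ((y1 : ℚ) - cy) / ((y1 : ℚ) - y2) from by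
            rw [← neg_div_neg_eq]; ring_nf]
          rw [div_le_one (by linarith)]; linarith
      · rw [hcx, hdx]; ring
      · rw [div_mul_cancel₀ _ hdyq]; ring
  · have hdxq : ((x2 : ℚ) - x1) ≠ 0 := fun hh => hdx (by exact_mod_cast sub_eq_zero.mp hh)
    have key : ((x2 : ℚ) - x1) * ((cy : ℚ) - y1) = ((y2 : ℚ) - y1) * ((cx : ℚ) - x1) := by
      exact_mod_cast hcol
    have key2 : ((cx : ℚ) - x1) * ((y2 : ℚ) - y1) = ((cy : ℚ) - y1) * ((x2 : ℚ) - x1) := by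
      linear_combination (-1 : ℚ) * key
    refine ⟨((cx : ℚ) - x1) / ((x2 : ℚ) - x1), ?_, ?_, ?_, ?_⟩
    · rcases le_total x1 x2 with h | h
      · have h1 : (x1 : ℚ) ≤ cx := by exact_mod_cast (by omega : x1 ≤ cx)
        have h2 : (x1 : ℚ) < x2 := by
          exact_mod_cast lt_of_le_of_ne h (fun hh => hdx hh.symm)
        exact div_nonneg (by linarith) (by linarith)
      · have h1 : (cx : ℚ) ≤ x1 := by exact_mod_cast (by omega : cx ≤ x1)
        have h2 : (x2 : ℚ) < x1 := by
          exact_mod_cast lt_of_le_of_ne h hdx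
        rw [show ((cx : ℚ) - x1) / ((x2 : ℚ) - x1) = ((x1 : ℚ) - cx) / ((x1 : ℚ) - x2) from by
          rw [← neg_div_neg_eq]; ring_nf]
        exact div_nonneg (by linarith) (by linarith)
    · rcases le_total x1 x2 with h | h
      · have h1 : (cx : ℚ) ≤ x2 := by exact_mod_cast (by omega : cx ≤ x2)
        have h2 : (x1 : ℚ) < x2 := by
          exact_mod_cast lt_of_le_of_ne h (fun hh => hdx hh.symm)
        rw [div_le_one (by linarith)]; linarith
      · have h1 : (x2 : ℚ) ≤ cx := by exact_mod_cast (by omega : x2 ≤ cx)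
        have h2 : (x2 : ℚ) < x1 := by
          exact_mod_cast lt_of_le_of_ne h hdx
        rw [show ((cx : ℚ) - x1) / ((x2 : ℚ) - x1) = ((x1 : ℚ) - cx) / ((x1 : ℚ) - x2) from by
          rw [← neg_div_neg_eq]; ring_nf]
        rw [div_le_one (by linarith)]; linarith
    · rw [div_mul_cancel₀ _ hdxq]; ring
    · rw [div_mul_eq_mul_div, key2, mul_div_assoc, div_self hdxq, mul_one]; ring

theorem segIntH_iff (x1 y1 x2 y2 xl xh e : Int) (hx : xl ≤ xh) :
    segments_intersect x1 y1 x2 y2 xl e xh e = true ↔ MeetH x1 y1 x2 y2 e xl xh := by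
  constructor
  · intro h
    simp only [segments_intersect, pvCross, pvOnSeg, decide_eq_true_eq, sub_self, zero_mul,
      sub_zero, min_self, max_self] at h
    split_ifs at h with h1 h2 h3 h4 h5
    · -- proper crossing
      obtain ⟨h12, h34⟩ := h1
      rcases h12 with ⟨ha, hb⟩ | ⟨ha, hb⟩
      · -- y2 < e < y1
        have h0 : xh - xl ≠ 0 := by
          intro hh; rw [hh, zero_mul] at ha; exact lt_irrefl 0 ha
        have hxlt : 0 < xh - xl := by omega
        have hy1 : 0 < y1 - e := by nlinarith
        have hy2 : y2 - e < 0 := by nlinarith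
        have hyq1 : (e : ℚ) < y1 := by exact_mod_cast (by omega : e < y1)
        have hyq2 : (y2 : ℚ) < e := by exact_mod_cast (by omega : y2 < e)
        have hden : (0:ℚ) < (y1 : ℚ) - y2 := by linarith
        have hden0 : ((y1 : ℚ) - y2) ≠ 0 := ne_of_gt hden
        have hxq : (xl : ℚ) ≤ xh := by exact_mod_cast hx
        have k3 : ((x1:ℚ) + (((y1:ℚ) - e)/((y1:ℚ) - y2)) * ((x2:ℚ) - x1) - xl) * ((y1:ℚ) - y2)
            = -(((x2:ℚ) - x1) * ((e:ℚ) - y1) - ((y2:ℚ) - y1) * ((xl:ℚ) - x1)) := by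
          field_simp; ring
        have k4 : ((x1:ℚ) + (((y1:ℚ) - e)/((y1:ℚ) - y2)) * ((x2:ℚ) - x1) - xh) * ((y1:ℚ) - y2)
            = -(((x2:ℚ) - x1) * ((e:ℚ) - y1) - ((y2:ℚ) - y1) * ((xh:ℚ) - x1)) := by
          field_simp; ring
        refine ⟨((y1:ℚ) - e)/((y1:ℚ) - y2), le_of_lt (div_pos (by linarith) hden), ?_, ?_, ?_, ?_⟩
        · rw [div_le_one hden]; linarith
        · field_simp; ring
        · rcases h34 with ⟨hc3, hc4⟩ | ⟨hc3, hc4⟩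
          · exfalso
            have h3q : (0:ℚ) < ((x2:ℚ) - x1) * ((e:ℚ) - y1) - ((y2:ℚ) - y1) * ((xl:ℚ) - x1) := by
              exact_mod_cast hc3
            have h4q : ((x2:ℚ) - x1) * ((e:ℚ) - y1) - ((y2:ℚ) - y1) * ((xh:ℚ) - x1) < 0 := by
              exact_mod_cast hc4
            nlinarith
          · have h3q : ((x2:ℚ) - x1) * ((e:ℚ) - y1) - ((y2:ℚ) - y1) * ((xl:ℚ) - x1) < 0 := by
              exact_mod_cast hc3
            nlinarith
        · rcases h34 with ⟨hc3, hc4⟩ | ⟨hc3, hc4⟩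
          · exfalso
            have h3q : (0:ℚ) < ((x2:ℚ) - x1) * ((e:ℚ) - y1) - ((y2:ℚ) - y1) * ((xl:ℚ) - x1) := by
              exact_mod_cast hc3
            have h4q : ((x2:ℚ) - x1) * ((e:ℚ) - y1) - ((y2:ℚ) - y1) * ((xh:ℚ) - x1) < 0 := by
              exact_mod_cast hc4
            nlinarith
          · have h4q : (0:ℚ) < ((x2:ℚ) - x1) * ((e:ℚ) - y1) - ((y2:ℚ) - y1) * ((xh:ℚ) - x1) := by
              exact_mod_cast hc4
            nlinarith
      · -- y1 < e < y2
        have h0 : xh - xl ≠ 0 := by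
          intro hh; rw [hh, zero_mul] at ha; exact lt_irrefl _ ha
        have hxlt : 0 < xh - xl := by omega
        have hy1 : y1 - e < 0 := by nlinarith
        have hy2 : 0 < y2 - e := by nlinarith
        have hyq1 : (y1 : ℚ) < e := by exact_mod_cast (by omega : y1 < e)
        have hyq2 : (e : ℚ) < y2 := by exact_mod_cast (by omega : e < y2)
        have hden : (0:ℚ) < (y2 : ℚ) - y1 := by linarith
        have hden0 : ((y2 : ℚ) - y1) ≠ 0 := ne_of_gt hden
        have hxq : (xl : ℚ) ≤ xh := by exact_mod_cast hx
        have k3 : ((x1:ℚ) + (((e:ℚ) - y1)/((y2:ℚ) - y1)) * ((x2:ℚ) - x1) - xl) * ((y2:ℚ) - y1)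
            = (((x2:ℚ) - x1) * ((e:ℚ) - y1) - ((y2:ℚ) - y1) * ((xl:ℚ) - x1)) := by
          field_simp; ring
        have k4 : ((x1:ℚ) + (((e:ℚ) - y1)/((y2:ℚ) - y1)) * ((x2:ℚ) - x1) - xh) * ((y2:ℚ) - y1)
            = (((x2:ℚ) - x1) * ((e:ℚ) - y1) - ((y2:ℚ) - y1) * ((xh:ℚ) - x1)) := by
          field_simp; ring
        refine ⟨((e:ℚ) - y1)/((y2:ℚ) - y1), le_of_lt (div_pos (by linarith) hden), ?_, ?_, ?_, ?_⟩
        · rw [div_le_one hden]; linarith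
        · field_simp; ring
        · rcases h34 with ⟨hc3, hc4⟩ | ⟨hc3, hc4⟩
          · have h3q : (0:ℚ) < ((x2:ℚ) - x1) * ((e:ℚ) - y1) - ((y2:ℚ) - y1) * ((xl:ℚ) - x1) := by
              exact_mod_cast hc3
            nlinarith
          · exfalso
            have h3q : ((x2:ℚ) - x1) * ((e:ℚ) - y1) - ((y2:ℚ) - y1) * ((xl:ℚ) - x1) < 0 := by
              exact_mod_cast hc3
            have h4q : (0:ℚ) < ((x2:ℚ) - x1) * ((e:ℚ) - y1) - ((y2:ℚ) - y1) * ((xh:ℚ) - x1) := by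
              exact_mod_cast hc4
            nlinarith
        · rcases h34 with ⟨hc3, hc4⟩ | ⟨hc3, hc4⟩
          · have h4q : ((x2:ℚ) - x1) * ((e:ℚ) - y1) - ((y2:ℚ) - y1) * ((xh:ℚ) - x1) < 0 := by
              exact_mod_cast hc4
            nlinarith
          · exfalso
            have h3q : ((x2:ℚ) - x1) * ((e:ℚ) - y1) - ((y2:ℚ) - y1) * ((xl:ℚ) - x1) < 0 := by
              exact_mod_cast hc3
            have h4q : (0:ℚ) < ((x2:ℚ) - x1) * ((e:ℚ) - y1) - ((y2:ℚ) - y1) * ((xh:ℚ) - x1) := by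
              exact_mod_cast hc4
            nlinarith
    · -- d1 = 0 and p1 on the edge
      have hy1e : y1 = e := by omega
      refine ⟨0, le_refl _, zero_le_one, by rw [hy1e]; ring, ?_, ?_⟩
      · have hxx : xl ≤ x1 := by omega
        have : (xl:ℚ) ≤ x1 := by exact_mod_cast hxx
        push_cast; linarith
      · have hxx : x1 ≤ xh := by omega
        have : (x1:ℚ) ≤ xh := by exact_mod_cast hxx
        push_cast; linarith
    · -- d2 = 0 and p2 on the edge
      have hy2e : y2 = e := by omega
      refine ⟨1, zero_le_one, le_refl _, by rw [hy2e]; ring, ?_, ?_⟩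
      · have hxx : xl ≤ x2 := by omega
        have : (xl:ℚ) ≤ x2 := by exact_mod_cast hxx
        push_cast; linarith
      · have hxx : x2 ≤ xh := by omega
        have : (x2:ℚ) ≤ xh := by exact_mod_cast hxx
        push_cast; linarith
    · -- d3 = 0 : corner (xl, e) on the segment
      have hcol : (x2 - x1) * (e - y1) = (y2 - y1) * (xl - x1) := sub_eq_zero.mp h4.1
      obtain ⟨t, ht0, ht1, hX, hY⟩ := collinear_param x1 y1 x2 y2 xl e hcol
        h4.2.1 h4.2.2.1 h4.2.2.2.1 h4.2.2.2.2
      exact ⟨t, ht0, ht1, hY, le_of_eq hX.symm, by rw [hX]; exact_mod_cast hx⟩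
    · -- d4 = 0 : corner (xh, e) on the segment
      have hcol : (x2 - x1) * (e - y1) = (y2 - y1) * (xh - x1) := sub_eq_zero.mp h5.1
      obtain ⟨t, ht0, ht1, hX, hY⟩ := collinear_param x1 y1 x2 y2 xh e hcol
        h5.2.1 h5.2.2.1 h5.2.2.2.1 h5.2.2.2.2
      exact ⟨t, ht0, ht1, hY, by rw [hX]; exact_mod_cast hx, le_of_eq hX⟩
  · intro hm
    obtain ⟨t, ht0, ht1, hYe, hxl, hxh⟩ := hm
    simp only [segments_intersect, pvCross, pvOnSeg, decide_eq_true_eq, sub_self, zero_mul,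
      sub_zero, min_self, max_self]
    split_ifs with h1 h2 h3 h4 h5
    · rfl
    · rfl
    · rfl
    · rfl
    · rfl
    exfalso
    have hxQ : (xl:ℚ) ≤ (xh:ℚ) := by exact_mod_cast hx
    by_cases hdy : y1 = y2
    · subst hdy
      have hy1e : y1 = e := by
        have h0 : (y1:ℚ) + t * ((y1:ℚ) - y1) = (y1:ℚ) := by ring
        rw [h0] at hYe
        exact_mod_cast hYe
      have hb := unit_between (u := (x1:ℚ)) (v := (x2:ℚ)) ht0 ht1
      have o1 : xl ≤ max x1 x2 := by
        have hq : (xl:ℚ) ≤ ((max x1 x2 : Int) : ℚ) := by push_cast; exact le_trans hxl hb.2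
        exact_mod_cast hq
      have o2 : min x1 x2 ≤ xh := by
        have hq : ((min x1 x2 : Int) : ℚ) ≤ (xh:ℚ) := by push_cast; exact le_trans hb.1 hxh
        exact_mod_cast hq
      have hcases : (xl ≤ x1 ∧ x1 ≤ xh) ∨ (xl ≤ x2 ∧ x2 ≤ xh) ∨
          (min x1 x2 ≤ xl ∧ xl ≤ max x1 x2) ∨ (min x1 x2 ≤ xh ∧ xh ≤ max x1 x2) := by omega
      rcases hcases with hc | hc | hc | hc
      · exact h2 ⟨by rw [hy1e]; ring, by omega, by omega, by omega, by omega⟩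
      · exact h3 ⟨by rw [hy1e]; ring, by omega, by omega, by omega, by omega⟩
      · exact h4 ⟨by rw [hy1e]; ring, by omega, by omega, by omega, by omega⟩
      · exact h5 ⟨by rw [hy1e]; ring, by omega, by omega, by omega, by omega⟩
    · have hdyq : ((y2:ℚ) - y1) ≠ 0 := fun hh =>
        hdy ((by exact_mod_cast sub_eq_zero.mp hh : y2 = y1)).symm
      by_cases ht0' : t = 0
      · rw [ht0'] at hYe hxl hxh
        simp only [zero_mul, add_zero] at hYe hxl hxh
        have hy1e : y1 = e := by exact_mod_cast hYe
        have ha : xl ≤ x1 := by exact_mod_cast hxl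
        have hb : x1 ≤ xh := by exact_mod_cast hxh
        exact h2 ⟨by rw [hy1e]; ring, by omega, by omega, by omega, by omega⟩
      · by_cases ht1' : t = 1
        · rw [ht1'] at hYe hxl hxh
          have hy2e : y2 = e := by
            have hq : (y2:ℚ) = e := by linarith [hYe]
            exact_mod_cast hq
          have ha : xl ≤ x2 := by
            have hq : (xl:ℚ) ≤ x2 := by linarith [hxl]
            exact_mod_cast hq
          have hb : x2 ≤ xh := by
            have hq : (x2:ℚ) ≤ xh := by linarith [hxh]
            exact_mod_cast hq
          exact h3 ⟨by rw [hy2e]; ring, by omega, by omega, by omega, by omega⟩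
        · have htpos : 0 < t := lt_of_le_of_ne ht0 (Ne.symm ht0')
          have htlt1 : t < 1 := lt_of_le_of_ne ht1 ht1'
          have ke1 : (y1:ℚ) - e = -t * ((y2:ℚ) - y1) := by linarith [hYe]
          have ke2 : (y2:ℚ) - e = (1 - t) * ((y2:ℚ) - y1) := by linarith [hYe]
          have kd3 : (((x2 - x1) * (e - y1) - (y2 - y1) * (xl - x1) : Int) : ℚ)
              = ((y2:ℚ) - y1) * ((x1:ℚ) + t * ((x2:ℚ) - x1) - xl) := by
            push_cast
            linear_combination (-((x2:ℚ) - (x1:ℚ))) * ke1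
          have kd4 : (((x2 - x1) * (e - y1) - (y2 - y1) * (xh - x1) : Int) : ℚ)
              = ((y2:ℚ) - y1) * ((x1:ℚ) + t * ((x2:ℚ) - x1) - xh) := by
            push_cast
            linear_combination (-((x2:ℚ) - (x1:ℚ))) * ke1
          have hd12sign : ((y1 - e) * (y2 - e) : Int) < 0 := by
            have hq : ((y1:ℚ) - e) * ((y2:ℚ) - e) < 0 := by
              rw [ke1, ke2]
              have h01 : 0 < t * (1 - t) := mul_pos htpos (by linarith)
              rcases lt_or_gt_of_ne hdyq with hno | hno
              · nlinarith [mul_pos_of_neg_of_neg hno hno, h01]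
              · nlinarith [mul_pos hno hno, h01]
            exact_mod_cast hq
          have hbx := unit_between (u := (x1:ℚ)) (v := (x2:ℚ)) ht0 ht1
          have hby := unit_between (u := (y1:ℚ)) (v := (y2:ℚ)) ht0 ht1
          by_cases hxlh : xl = xh
          · have h' : (x1:ℚ) + t * ((x2:ℚ) - x1) ≤ (xl:ℚ) := by rw [hxlh]; exact hxh
            have hXeq : (x1:ℚ) + t * ((x2:ℚ) - x1) = (xl:ℚ) := le_antisymm h' hxl
            have hd3z : (x2 - x1) * (e - y1) - (y2 - y1) * (xl - x1) = 0 := by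
              have hq : (((x2 - x1) * (e - y1) - (y2 - y1) * (xl - x1) : Int) : ℚ) = 0 := by
                rw [kd3, hXeq]; ring
              exact_mod_cast hq
            apply h4
            refine ⟨hd3z, ?_, ?_, ?_, ?_⟩
            · have := hbx.1; rw [hXeq] at this; exact_mod_cast this
            · have := hbx.2; rw [hXeq] at this; exact_mod_cast this
            · have := hby.1; rw [hYe] at this; exact_mod_cast this
            · have := hby.2; rw [hYe] at this; exact_mod_cast this
          · have hxe : 0 < xh - xl := by omega
            by_cases hd3 : (x2 - x1) * (e - y1) - (y2 - y1) * (xl - x1) = 0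
            · have hXeq : (x1:ℚ) + t * ((x2:ℚ) - x1) = (xl:ℚ) := by
                have h0 : (((x2 - x1) * (e - y1) - (y2 - y1) * (xl - x1) : Int) : ℚ) = 0 := by
                  exact_mod_cast hd3
                rw [kd3] at h0
                rcases mul_eq_zero.mp h0 with h | h
                · exact absurd h hdyq
                · linarith [sub_eq_zero.mp h]
              apply h4
              refine ⟨hd3, ?_, ?_, ?_, ?_⟩
              · have := hbx.1; rw [hXeq] at this; exact_mod_cast this
              · have := hbx.2; rw [hXeq] at this; exact_mod_cast this
              · have := hby.1; rw [hYe] at this; exact_mod_cast this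
              · have := hby.2; rw [hYe] at this; exact_mod_cast this
            · by_cases hd4 : (x2 - x1) * (e - y1) - (y2 - y1) * (xh - x1) = 0
              · have hXeq : (x1:ℚ) + t * ((x2:ℚ) - x1) = (xh:ℚ) := by
                  have h0 : (((x2 - x1) * (e - y1) - (y2 - y1) * (xh - x1) : Int) : ℚ) = 0 := by
                    exact_mod_cast hd4
                  rw [kd4] at h0
                  rcases mul_eq_zero.mp h0 with h | h
                  · exact absurd h hdyq
                  · linarith [sub_eq_zero.mp h]
                apply h5
                refine ⟨hd4, ?_, ?_, ?_, ?_⟩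
                · have := hbx.1; rw [hXeq] at this; exact_mod_cast this
                · have := hbx.2; rw [hXeq] at this; exact_mod_cast this
                · have := hby.1; rw [hYe] at this; exact_mod_cast this
                · have := hby.2; rw [hYe] at this; exact_mod_cast this
              · apply h1
                have hXl : (0:ℚ) < (x1:ℚ) + t * ((x2:ℚ) - x1) - xl := by
                  rcases eq_or_lt_of_le hxl with hEq | hlt
                  · exfalso; apply hd3
                    have hq : (((x2 - x1) * (e - y1) - (y2 - y1) * (xl - x1) : Int) : ℚ) = 0 := by
                      rw [kd3, ← hEq]; ring
                    exact_mod_cast hq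
                  · linarith
                have hXh : (x1:ℚ) + t * ((x2:ℚ) - x1) - xh < 0 := by
                  rcases eq_or_lt_of_le hxh with hEq | hlt
                  · exfalso; apply hd4
                    have hq : (((x2 - x1) * (e - y1) - (y2 - y1) * (xh - x1) : Int) : ℚ) = 0 := by
                      rw [kd4, hEq]; ring
                    exact_mod_cast hq
                  · linarith
                constructor
                · rcases lt_trichotomy (y1 - e) 0 with hs | hs | hs
                  · right
                    refine ⟨mul_neg_of_pos_of_neg hxe hs, ?_⟩
                    have h2' : 0 < y2 - e := by nlinarith [hd12sign]
                    exact mul_pos hxe h2'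
                  · exfalso; rw [hs, zero_mul] at hd12sign; exact lt_irrefl 0 hd12sign
                  · left
                    refine ⟨mul_pos hxe hs, ?_⟩
                    have h2' : y2 - e < 0 := by nlinarith [hd12sign]
                    exact mul_neg_of_pos_of_neg hxe h2'
                · rcases lt_or_gt_of_ne hdyq with hneg | hpos
                  · right
                    constructor
                    · have hq : (((x2 - x1) * (e - y1) - (y2 - y1) * (xl - x1) : Int) : ℚ) < 0 := by
                        rw [kd3]; exact mul_neg_of_neg_of_pos hneg hXl
                      exact_mod_cast hq
                    · have hq : (0:ℚ) < (((x2 - x1) * (e - y1) - (y2 - y1) * (xh - x1) : Int) : ℚ) := by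
                        rw [kd4]; exact mul_pos_of_neg_of_neg hneg hXh
                      exact_mod_cast hq
                  · left
                    constructor
                    · have hq : (0:ℚ) < (((x2 - x1) * (e - y1) - (y2 - y1) * (xl - x1) : Int) : ℚ) := by
                        rw [kd3]; exact mul_pos hpos hXl
                      exact_mod_cast hq
                    · have hq : (((x2 - x1) * (e - y1) - (y2 - y1) * (xh - x1) : Int) : ℚ) < 0 := by
                        rw [kd4]; exact mul_neg_of_pos_of_neg hpos hXh
                      exact_mod_cast hq

theorem affine_interp (m c p q w : ℚ) (hpw : p ≤ w) (hwq : w ≤ q)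
    (hfp : 0 < m * p + c) (hfq : 0 < m * q + c) : 0 < m * w + c := by
  by_cases h : w ≤ p
  · have hw : w = p := le_antisymm h hpw
    rw [hw]; exact hfp
  · push_neg at h
    by_cases h2 : q ≤ w
    · have hw : w = q := le_antisymm hwq h2
      rw [hw]; exact hfq
    · push_neg at h2
      nlinarith [mul_pos (sub_pos.mpr h2) hfp, mul_pos (sub_pos.mpr h) hfq]

theorem affine_pos_box (A B C : ℚ) (xl xh yl yh : Int) (u v : ℚ)
    (hxx : xl ≤ xh) (hyy : yl ≤ yh)
    (h1 : (xl:ℚ) ≤ u) (h2 : u ≤ (xh:ℚ)) (h3 : (yl:ℚ) ≤ v) (h4 : v ≤ (yh:ℚ))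
    (c1 : 0 < A * (xl:ℚ) + B * (yl:ℚ) + C) (c2 : 0 < A * (xl:ℚ) + B * (yh:ℚ) + C)
    (c3 : 0 < A * (xh:ℚ) + B * (yl:ℚ) + C) (c4 : 0 < A * (xh:ℚ) + B * (yh:ℚ) + C) :
    0 < A * u + B * v + C := by
  have g1 : 0 < B * v + (A * (xl:ℚ) + C) :=
    affine_interp B (A * (xl:ℚ) + C) (yl:ℚ) (yh:ℚ) v h3 h4 (by linarith) (by linarith)
  have g2 : 0 < B * v + (A * (xh:ℚ) + C) :=
    affine_interp B (A * (xh:ℚ) + C) (yl:ℚ) (yh:ℚ) v h3 h4 (by linarith) (by linarith)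
  have g3 : 0 < A * u + (B * v + C) :=
    affine_interp A (B * v + C) (xl:ℚ) (xh:ℚ) u h1 h2 (by linarith) (by linarith)
  linarith

theorem slab (x1 x2 xl xh : Int) (hdx : x2 ≠ x1) (hx : xl ≤ xh)
    (hc1 : xl ≤ max x1 x2) (hc2 : min x1 x2 ≤ xh) :
    0 ≤ max (((xl:ℚ) - x1) / ((x2:ℚ) - x1)) (((xh:ℚ) - x1) / ((x2:ℚ) - x1)) ∧
    min (((xl:ℚ) - x1) / ((x2:ℚ) - x1)) (((xh:ℚ) - x1) / ((x2:ℚ) - x1)) ≤ 1 ∧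
    ∀ t : ℚ, ((xl:ℚ) ≤ (x1:ℚ) + t * ((x2:ℚ) - x1) ∧ (x1:ℚ) + t * ((x2:ℚ) - x1) ≤ (xh:ℚ)) ↔
      (min (((xl:ℚ) - x1) / ((x2:ℚ) - x1)) (((xh:ℚ) - x1) / ((x2:ℚ) - x1)) ≤ t ∧
       t ≤ max (((xl:ℚ) - x1) / ((x2:ℚ) - x1)) (((xh:ℚ) - x1) / ((x2:ℚ) - x1))) := by
  rcases lt_or_gt_of_ne hdx with hlt | hlt
  · -- x2 < x1
    have hd : ((x2:ℚ) - x1) < 0 := by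
      have hq : (x2:ℚ) < x1 := by exact_mod_cast hlt
      linarith
    have hd0 : ((x2:ℚ) - x1) ≠ 0 := ne_of_lt hd
    have hxq : (xl:ℚ) ≤ xh := by exact_mod_cast hx
    have key_l : (((xl:ℚ) - x1) / ((x2:ℚ) - x1)) * ((x2:ℚ) - x1) = (xl:ℚ) - x1 :=
      div_mul_cancel₀ _ hd0
    have key_h : (((xh:ℚ) - x1) / ((x2:ℚ) - x1)) * ((x2:ℚ) - x1) = (xh:ℚ) - x1 :=
      div_mul_cancel₀ _ hd0
    have hab : ((xh:ℚ) - x1) / ((x2:ℚ) - x1) ≤ ((xl:ℚ) - x1) / ((x2:ℚ) - x1) := by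
      by_contra hcon; push_neg at hcon
      have hmm := mul_lt_mul_of_neg_right hcon hd
      rw [key_l, key_h] at hmm; linarith
    rw [min_eq_right hab, max_eq_left hab]
    refine ⟨?_, ?_, ?_⟩
    · have hx1 : xl ≤ x1 := by omega
      have hq : (xl:ℚ) - x1 ≤ 0 := by
        have : (xl:ℚ) ≤ x1 := by exact_mod_cast hx1
        linarith
      rw [show ((xl:ℚ) - x1) / ((x2:ℚ) - x1) = ((x1:ℚ) - xl) / ((x1:ℚ) - x2) from by
        rw [← neg_div_neg_eq]; ring_nf]
      exact div_nonneg (by linarith) (by linarith)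
    · have hx2 : x2 ≤ xh := by omega
      by_contra hcon; push_neg at hcon
      have hmm := mul_lt_mul_of_neg_right hcon hd
      rw [key_h, one_mul] at hmm
      have hq : (x2:ℚ) ≤ xh := by exact_mod_cast hx2
      linarith
    · intro t
      constructor
      · rintro ⟨hA, hB⟩
        constructor
        · by_contra hcon; push_neg at hcon
          have hmm := mul_lt_mul_of_neg_right hcon hd
          rw [key_h] at hmm; linarith
        · by_contra hcon; push_neg at hcon
          have hmm := mul_lt_mul_of_neg_right hcon hd
          rw [key_l] at hmm; linarith
      · rintro ⟨hA, hB⟩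
        constructor
        · have hmm := mul_le_mul_of_nonpos_right hB hd.le
          rw [key_l] at hmm; linarith
        · have hmm := mul_le_mul_of_nonpos_right hA hd.le
          rw [key_h] at hmm; linarith
  · -- x1 < x2
    have hdq : (0:ℚ) < (x2:ℚ) - x1 := by
      have hq : (x1:ℚ) < x2 := by exact_mod_cast hlt
      linarith
    have hd0 : ((x2:ℚ) - x1) ≠ 0 := ne_of_gt hdq
    have hxq : (xl:ℚ) ≤ xh := by exact_mod_cast hx
    have key_l : (((xl:ℚ) - x1) / ((x2:ℚ) - x1)) * ((x2:ℚ) - x1) = (xl:ℚ) - x1 :=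
      div_mul_cancel₀ _ hd0
    have key_h : (((xh:ℚ) - x1) / ((x2:ℚ) - x1)) * ((x2:ℚ) - x1) = (xh:ℚ) - x1 :=
      div_mul_cancel₀ _ hd0
    have hab : ((xl:ℚ) - x1) / ((x2:ℚ) - x1) ≤ ((xh:ℚ) - x1) / ((x2:ℚ) - x1) := by
      by_contra hcon; push_neg at hcon
      have hmm := mul_lt_mul_of_pos_right hcon hdq
      rw [key_l, key_h] at hmm; linarith
    rw [min_eq_left hab, max_eq_right hab]
    refine ⟨?_, ?_, ?_⟩
    · have hx1 : x1 ≤ xh := by omega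
      have hq : (x1:ℚ) ≤ xh := by exact_mod_cast hx1
      exact div_nonneg (by linarith) hdq.le
    · have hx2 : xl ≤ x2 := by omega
      by_contra hcon; push_neg at hcon
      have hmm := mul_lt_mul_of_pos_right hcon hdq
      rw [key_l, one_mul] at hmm
      have hq : (xl:ℚ) ≤ x2 := by exact_mod_cast hx2
      linarith
    · intro t
      constructor
      · rintro ⟨hA, hB⟩
        constructor
        · by_contra hcon; push_neg at hcon
          have hmm := mul_lt_mul_of_pos_right hcon hdq
          rw [key_l] at hmm; linarith
        · by_contra hcon; push_neg at hcon
          have hmm := mul_lt_mul_of_pos_right hcon hdq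
          rw [key_h] at hmm; linarith
      · rintro ⟨hA, hB⟩
        constructor
        · have hmm := mul_le_mul_of_nonneg_right hA hdq.le
          rw [key_l] at hmm; linarith
        · have hmm := mul_le_mul_of_nonneg_right hB hdq.le
          rw [key_h] at hmm; linarith

theorem param_of_between (y1 y2 c : Int) (h1 : min y1 y2 ≤ c) (h2 : c ≤ max y1 y2) :
    ∃ t : ℚ, 0 ≤ t ∧ t ≤ 1 ∧ (y1:ℚ) + t * ((y2:ℚ) - y1) = c := by
  obtain ⟨t, a, b, _, hY⟩ := collinear_param 0 y1 0 y2 0 c (by ring) (by simp) (by simp) h1 h2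
  exact ⟨t, a, b, hY⟩

theorem A_char (x1 y1 x2 y2 xl yl xh yh : Int) (hx : xl ≤ xh) (hy : yl ≤ yh) :
    ((if xl ≤ x1 ∧ x1 ≤ xh ∧ yl ≤ y1 ∧ y1 ≤ yh then true
      else if xl ≤ x2 ∧ x2 ≤ xh ∧ yl ≤ y2 ∧ y2 ≤ yh then true
      else
        [(xl, yl, xh, yl), (xl, yh, xh, yh), (xl, yl, xl, yh), (xh, yl, xh, yh)].any
          (fun e => segments_intersect x1 y1 x2 y2 e.1 e.2.1 e.2.2.1 e.2.2.2)) = true) ↔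
    KProp x1 y1 x2 y2 xl yl xh yh := by
  have hseg1 := segIntH_iff x1 y1 x2 y2 xl xh yl hx
  have hseg2 := segIntH_iff x1 y1 x2 y2 xl xh yh hx
  have hseg3 : segments_intersect x1 y1 x2 y2 xl yl xl yh = true ↔ MeetH y1 x1 y2 x2 xl yl yh := by
    rw [segInt_swap]; exact segIntH_iff y1 x1 y2 x2 yl yh xl hy
  have hseg4 : segments_intersect x1 y1 x2 y2 xh yl xh yh = true ↔ MeetH y1 x1 y2 x2 xh yl yh := by
    rw [segInt_swap]; exact segIntH_iff y1 x1 y2 x2 yl yh xh hy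
  unfold KProp InBox
  split_ifs with h1 h2
  · exact iff_of_true rfl (Or.inl h1)
  · exact iff_of_true rfl (Or.inr (Or.inl h2))
  · simp only [List.any_cons, List.any_nil, Bool.or_false, Bool.or_eq_true]
    rw [hseg1, hseg2, hseg3, hseg4]
    constructor
    · rintro (h | h | h | h)
      · exact Or.inr (Or.inr (Or.inl h))
      · exact Or.inr (Or.inr (Or.inr (Or.inl h)))
      · exact Or.inr (Or.inr (Or.inr (Or.inr (Or.inl h))))
      · exact Or.inr (Or.inr (Or.inr (Or.inr (Or.inr h))))
    · rintro (h | h | h | h | h | h)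
      · exact absurd h h1
      · exact absurd h h2
      · exact Or.inl h
      · exact Or.inr (Or.inl h)
      · exact Or.inr (Or.inr (Or.inl h))
      · exact Or.inr (Or.inr (Or.inr h))

theorem K_to_B (x1 y1 x2 y2 xl yl xh yh : Int) (hx : xl ≤ xh) (hy : yl ≤ yh)
    (hk : KProp x1 y1 x2 y2 xl yl xh yh) :
    (xl ≤ max x1 x2 ∧ min x1 x2 ≤ xh) ∧ (yl ≤ max y1 y2 ∧ min y1 y2 ≤ yh) ∧
    ¬((0 < (x2 - x1) * (yl - y1) - (y2 - y1) * (xl - x1) ∧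
       0 < (x2 - x1) * (yh - y1) - (y2 - y1) * (xl - x1) ∧
       0 < (x2 - x1) * (yl - y1) - (y2 - y1) * (xh - x1) ∧
       0 < (x2 - x1) * (yh - y1) - (y2 - y1) * (xh - x1)) ∨
      ((x2 - x1) * (yl - y1) - (y2 - y1) * (xl - x1) < 0 ∧
       (x2 - x1) * (yh - y1) - (y2 - y1) * (xl - x1) < 0 ∧
       (x2 - x1) * (yl - y1) - (y2 - y1) * (xh - x1) < 0 ∧
       (x2 - x1) * (yh - y1) - (y2 - y1) * (xh - x1) < 0)) := by
  have hxq : (xl:ℚ) ≤ xh := by exact_mod_cast hx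
  have hyq : (yl:ℚ) ≤ yh := by exact_mod_cast hy
  have hpt : ∃ t : ℚ, 0 ≤ t ∧ t ≤ 1 ∧
      (xl:ℚ) ≤ (x1:ℚ) + t * ((x2:ℚ) - x1) ∧ (x1:ℚ) + t * ((x2:ℚ) - x1) ≤ (xh:ℚ) ∧
      (yl:ℚ) ≤ (y1:ℚ) + t * ((y2:ℚ) - y1) ∧ (y1:ℚ) + t * ((y2:ℚ) - y1) ≤ (yh:ℚ) := by
    unfold KProp InBox at hk
    rcases hk with ⟨a, b, c, d⟩ | ⟨a, b, c, d⟩ | h | h | h | h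
    · refine ⟨0, le_refl _, zero_le_one, ?_, ?_, ?_, ?_⟩
      · have : (xl:ℚ) ≤ x1 := by exact_mod_cast a
        linarith
      · have : (x1:ℚ) ≤ xh := by exact_mod_cast b
        linarith
      · have : (yl:ℚ) ≤ y1 := by exact_mod_cast c
        linarith
      · have : (y1:ℚ) ≤ yh := by exact_mod_cast d
        linarith
    · refine ⟨1, zero_le_one, le_refl _, ?_, ?_, ?_, ?_⟩
      · have : (xl:ℚ) ≤ x2 := by exact_mod_cast a
        linarith
      · have : (x2:ℚ) ≤ xh := by exact_mod_cast b
        linarith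
      · have : (yl:ℚ) ≤ y2 := by exact_mod_cast c
        linarith
      · have : (y2:ℚ) ≤ yh := by exact_mod_cast d
        linarith
    · obtain ⟨t, h0, h1, he, ha, hb⟩ := h
      exact ⟨t, h0, h1, ha, hb, le_of_eq he.symm, by rw [he]; exact hyq⟩
    · obtain ⟨t, h0, h1, he, ha, hb⟩ := h
      exact ⟨t, h0, h1, ha, hb, by rw [he]; exact hyq, le_of_eq he⟩
    · obtain ⟨t, h0, h1, he, ha, hb⟩ := h
      exact ⟨t, h0, h1, le_of_eq he.symm, by rw [he]; exact hxq, ha, hb⟩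
    · obtain ⟨t, h0, h1, he, ha, hb⟩ := h
      exact ⟨t, h0, h1, by rw [he]; exact hxq, le_of_eq he, ha, hb⟩
  obtain ⟨t, ht0, ht1, hxlb, hxhb, hylb, hyhb⟩ := hpt
  have hbx := unit_between (u := (x1:ℚ)) (v := (x2:ℚ)) ht0 ht1
  have hby := unit_between (u := (y1:ℚ)) (v := (y2:ℚ)) ht0 ht1
  refine ⟨⟨?_, ?_⟩, ⟨?_, ?_⟩, ?_⟩
  · have hq : (xl:ℚ) ≤ ((max x1 x2 : Int):ℚ) := by push_cast; linarith [hbx.2]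
    exact_mod_cast hq
  · have hq : ((min x1 x2 : Int):ℚ) ≤ (xh:ℚ) := by push_cast; linarith [hbx.1]
    exact_mod_cast hq
  · have hq : (yl:ℚ) ≤ ((max y1 y2 : Int):ℚ) := by push_cast; linarith [hby.2]
    exact_mod_cast hq
  · have hq : ((min y1 y2 : Int):ℚ) ≤ (yh:ℚ) := by push_cast; linarith [hby.1]
    exact_mod_cast hq
  · intro hPQ
    rcases hPQ with ⟨s1, s2, s3, s4⟩ | ⟨s1, s2, s3, s4⟩
    · have hz : (-((y2:ℚ) - y1)) * ((x1:ℚ) + t * ((x2:ℚ) - x1)) +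
          ((x2:ℚ) - x1) * ((y1:ℚ) + t * ((y2:ℚ) - y1)) +
          (((y2:ℚ) - y1) * x1 - ((x2:ℚ) - x1) * y1) = 0 := by ring
      have hc1 : 0 < (-((y2:ℚ) - y1)) * (xl:ℚ) + ((x2:ℚ) - x1) * (yl:ℚ) +
          (((y2:ℚ) - y1) * x1 - ((x2:ℚ) - x1) * y1) := by
        have hq : (0:ℚ) < (((x2 - x1) * (yl - y1) - (y2 - y1) * (xl - x1) : Int):ℚ) := by
          exact_mod_cast s1
        push_cast at hq; linarith [hq]
      have hc2 : 0 < (-((y2:ℚ) - y1)) * (xl:ℚ) + ((x2:ℚ) - x1) * (yh:ℚ) +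
          (((y2:ℚ) - y1) * x1 - ((x2:ℚ) - x1) * y1) := by
        have hq : (0:ℚ) < (((x2 - x1) * (yh - y1) - (y2 - y1) * (xl - x1) : Int):ℚ) := by
          exact_mod_cast s2
        push_cast at hq; linarith [hq]
      have hc3 : 0 < (-((y2:ℚ) - y1)) * (xh:ℚ) + ((x2:ℚ) - x1) * (yl:ℚ) +
          (((y2:ℚ) - y1) * x1 - ((x2:ℚ) - x1) * y1) := by
        have hq : (0:ℚ) < (((x2 - x1) * (yl - y1) - (y2 - y1) * (xh - x1) : Int):ℚ) := by
          exact_mod_cast s3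
        push_cast at hq; linarith [hq]
      have hc4 : 0 < (-((y2:ℚ) - y1)) * (xh:ℚ) + ((x2:ℚ) - x1) * (yh:ℚ) +
          (((y2:ℚ) - y1) * x1 - ((x2:ℚ) - x1) * y1) := by
        have hq : (0:ℚ) < (((x2 - x1) * (yh - y1) - (y2 - y1) * (xh - x1) : Int):ℚ) := by
          exact_mod_cast s4
        push_cast at hq; linarith [hq]
      have hp := affine_pos_box (-((y2:ℚ) - y1)) ((x2:ℚ) - x1)
        (((y2:ℚ) - y1) * x1 - ((x2:ℚ) - x1) * y1) xl xh yl yh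
        ((x1:ℚ) + t * ((x2:ℚ) - x1)) ((y1:ℚ) + t * ((y2:ℚ) - y1))
        hx hy hxlb hxhb hylb hyhb hc1 hc2 hc3 hc4
      linarith
    · have hz : ((y2:ℚ) - y1) * ((x1:ℚ) + t * ((x2:ℚ) - x1)) +
          (-((x2:ℚ) - x1)) * ((y1:ℚ) + t * ((y2:ℚ) - y1)) +
          (((x2:ℚ) - x1) * y1 - ((y2:ℚ) - y1) * x1) = 0 := by ring
      have hc1 : 0 < ((y2:ℚ) - y1) * (xl:ℚ) + (-((x2:ℚ) - x1)) * (yl:ℚ) +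
          (((x2:ℚ) - x1) * y1 - ((y2:ℚ) - y1) * x1) := by
        have hq : (((x2 - x1) * (yl - y1) - (y2 - y1) * (xl - x1) : Int):ℚ) < 0 := by
          exact_mod_cast s1
        push_cast at hq; linarith [hq]
      have hc2 : 0 < ((y2:ℚ) - y1) * (xl:ℚ) + (-((x2:ℚ) - x1)) * (yh:ℚ) +
          (((x2:ℚ) - x1) * y1 - ((y2:ℚ) - y1) * x1) := by
        have hq : (((x2 - x1) * (yh - y1) - (y2 - y1) * (xl - x1) : Int):ℚ) < 0 := by
          exact_mod_cast s2
        push_cast at hq; linarith [hq]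
      have hc3 : 0 < ((y2:ℚ) - y1) * (xh:ℚ) + (-((x2:ℚ) - x1)) * (yl:ℚ) +
          (((x2:ℚ) - x1) * y1 - ((y2:ℚ) - y1) * x1) := by
        have hq : (((x2 - x1) * (yl - y1) - (y2 - y1) * (xh - x1) : Int):ℚ) < 0 := by
          exact_mod_cast s3
        push_cast at hq; linarith [hq]
      have hc4 : 0 < ((y2:ℚ) - y1) * (xh:ℚ) + (-((x2:ℚ) - x1)) * (yh:ℚ) +
          (((x2:ℚ) - x1) * y1 - ((y2:ℚ) - y1) * x1) := by
        have hq : (((x2 - x1) * (yh - y1) - (y2 - y1) * (xh - x1) : Int):ℚ) < 0 := by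
          exact_mod_cast s4
        push_cast at hq; linarith [hq]
      have hp := affine_pos_box ((y2:ℚ) - y1) (-((x2:ℚ) - x1))
        (((x2:ℚ) - x1) * y1 - ((y2:ℚ) - y1) * x1) xl xh yl yh
        ((x1:ℚ) + t * ((x2:ℚ) - x1)) ((y1:ℚ) + t * ((y2:ℚ) - y1))
        hx hy hxlb hxhb hylb hyhb hc1 hc2 hc3 hc4
      linarith

theorem B_to_K (x1 y1 x2 y2 xl yl xh yh : Int) (hx : xl ≤ xh) (hy : yl ≤ yh)
    (hc1 : xl ≤ max x1 x2) (hc2 : min x1 x2 ≤ xh)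
    (hc3 : yl ≤ max y1 y2) (hc4 : min y1 y2 ≤ yh)
    (hs : ¬((0 < (x2 - x1) * (yl - y1) - (y2 - y1) * (xl - x1) ∧
       0 < (x2 - x1) * (yh - y1) - (y2 - y1) * (xl - x1) ∧
       0 < (x2 - x1) * (yl - y1) - (y2 - y1) * (xh - x1) ∧
       0 < (x2 - x1) * (yh - y1) - (y2 - y1) * (xh - x1)) ∨
      ((x2 - x1) * (yl - y1) - (y2 - y1) * (xl - x1) < 0 ∧
       (x2 - x1) * (yh - y1) - (y2 - y1) * (xl - x1) < 0 ∧
       (x2 - x1) * (yl - y1) - (y2 - y1) * (xh - x1) < 0 ∧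
       (x2 - x1) * (yh - y1) - (y2 - y1) * (xh - x1) < 0))) :
    KProp x1 y1 x2 y2 xl yl xh yh := by
  by_cases hdx : x1 = x2
  · subst hdx
    by_cases hdy : y1 = y2
    · subst hdy
      unfold KProp InBox
      left
      omega
    · by_cases hyl : yl ≤ min y1 y2
      · rcases le_total y1 y2 with hcmp | hcmp
        · unfold KProp InBox; left; omega
        · unfold KProp InBox; right; left; omega
      · obtain ⟨t, a, b, hY⟩ := param_of_between y1 y2 yl (by omega) (by omega)
        unfold KProp
        right; right; left
        refine ⟨t, a, b, hY, ?_, ?_⟩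
        · have hq : (xl:ℚ) ≤ x1 := by exact_mod_cast (by omega : xl ≤ x1)
          have he : (x1:ℚ) + t * ((x1:ℚ) - x1) = (x1:ℚ) := by ring
          rw [he]; exact hq
        · have hq : (x1:ℚ) ≤ xh := by exact_mod_cast (by omega : x1 ≤ xh)
          have he : (x1:ℚ) + t * ((x1:ℚ) - x1) = (x1:ℚ) := by ring
          rw [he]; exact hq
  · by_cases hdy : y1 = y2
    · subst hdy
      by_cases hxl : xl ≤ min x1 x2
      · rcases le_total x1 x2 with hcmp | hcmp
        · unfold KProp InBox; left; omega
        · unfold KProp InBox; right; left; omega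
      · obtain ⟨t, a, b, hX⟩ := param_of_between x1 x2 xl (by omega) (by omega)
        unfold KProp
        right; right; right; right; left
        refine ⟨t, a, b, hX, ?_, ?_⟩
        · have hq : (yl:ℚ) ≤ y1 := by exact_mod_cast (by omega : yl ≤ y1)
          have he : (y1:ℚ) + t * ((y1:ℚ) - y1) = (y1:ℚ) := by ring
          rw [he]; exact hq
        · have hq : (y1:ℚ) ≤ yh := by exact_mod_cast (by omega : y1 ≤ yh)
          have he : (y1:ℚ) + t * ((y1:ℚ) - y1) = (y1:ℚ) := by ring
          rw [he]; exact hq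
    · obtain ⟨hmaxx, hminx, hiffx⟩ := slab x1 x2 xl xh (Ne.symm hdx) hx hc1 hc2
      obtain ⟨hmaxy, hminy, hiffy⟩ := slab y1 y2 yl yh (Ne.symm hdy) hy hc3 hc4
      have hdxq : ((x2:ℚ) - x1) ≠ 0 := fun hh =>
        hdx ((by exact_mod_cast sub_eq_zero.mp hh : x2 = x1)).symm
      have hdyq : ((y2:ℚ) - y1) ≠ 0 := fun hh =>
        hdy ((by exact_mod_cast sub_eq_zero.mp hh : y2 = y1)).symm
      set tlx := ((xl:ℚ) - x1) / ((x2:ℚ) - x1) with htlx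
      set thx := ((xh:ℚ) - x1) / ((x2:ℚ) - x1) with hthx
      set tly := ((yl:ℚ) - y1) / ((y2:ℚ) - y1) with htly
      set thy := ((yh:ℚ) - y1) / ((y2:ℚ) - y1) with hthy
      have i1 : (((x2 - x1) * (yl - y1) - (y2 - y1) * (xl - x1) : Int):ℚ)
          = (((x2:ℚ) - x1) * ((y2:ℚ) - y1)) * (tly - tlx) := by
        rw [htly, htlx]; push_cast; field_simp
      have i2 : (((x2 - x1) * (yh - y1) - (y2 - y1) * (xl - x1) : Int):ℚ)
          = (((x2:ℚ) - x1) * ((y2:ℚ) - y1)) * (thy - tlx) := by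
        rw [hthy, htlx]; push_cast; field_simp
      have i3 : (((x2 - x1) * (yl - y1) - (y2 - y1) * (xh - x1) : Int):ℚ)
          = (((x2:ℚ) - x1) * ((y2:ℚ) - y1)) * (tly - thx) := by
        rw [htly, hthx]; push_cast; field_simp
      have i4 : (((x2 - x1) * (yh - y1) - (y2 - y1) * (xh - x1) : Int):ℚ)
          = (((x2:ℚ) - x1) * ((y2:ℚ) - y1)) * (thy - thx) := by
        rw [hthy, hthx]; push_cast; field_simp
      have hcross1 : min tlx thx ≤ max tly thy := by
        by_contra hcon; push_neg at hcon
        have d11 : tly - tlx < 0 := by linarith [le_max_left tly thy, min_le_left tlx thx]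
        have d21 : thy - tlx < 0 := by linarith [le_max_right tly thy, min_le_left tlx thx]
        have d12 : tly - thx < 0 := by linarith [le_max_left tly thy, min_le_right tlx thx]
        have d22 : thy - thx < 0 := by linarith [le_max_right tly thy, min_le_right tlx thx]
        rcases lt_or_gt_of_ne (mul_ne_zero hdxq hdyq) with hneg | hpos
        · apply hs; left
          refine ⟨?_, ?_, ?_, ?_⟩
          · have hq : (0:ℚ) < (((x2 - x1) * (yl - y1) - (y2 - y1) * (xl - x1) : Int):ℚ) := by
              rw [i1]; exact mul_pos_of_neg_of_neg hneg (by linarith)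
            exact_mod_cast hq
          · have hq : (0:ℚ) < (((x2 - x1) * (yh - y1) - (y2 - y1) * (xl - x1) : Int):ℚ) := by
              rw [i2]; exact mul_pos_of_neg_of_neg hneg (by linarith)
            exact_mod_cast hq
          · have hq : (0:ℚ) < (((x2 - x1) * (yl - y1) - (y2 - y1) * (xh - x1) : Int):ℚ) := by
              rw [i3]; exact mul_pos_of_neg_of_neg hneg (by linarith)
            exact_mod_cast hq
          · have hq : (0:ℚ) < (((x2 - x1) * (yh - y1) - (y2 - y1) * (xh - x1) : Int):ℚ) := by
              rw [i4]; exact mul_pos_of_neg_of_neg hneg (by linarith)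
            exact_mod_cast hq
        · apply hs; right
          refine ⟨?_, ?_, ?_, ?_⟩
          · have hq : (((x2 - x1) * (yl - y1) - (y2 - y1) * (xl - x1) : Int):ℚ) < 0 := by
              rw [i1]; exact mul_neg_of_pos_of_neg hpos (by linarith)
            exact_mod_cast hq
          · have hq : (((x2 - x1) * (yh - y1) - (y2 - y1) * (xl - x1) : Int):ℚ) < 0 := by
              rw [i2]; exact mul_neg_of_pos_of_neg hpos (by linarith)
            exact_mod_cast hq
          · have hq : (((x2 - x1) * (yl - y1) - (y2 - y1) * (xh - x1) : Int):ℚ) < 0 := by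
              rw [i3]; exact mul_neg_of_pos_of_neg hpos (by linarith)
            exact_mod_cast hq
          · have hq : (((x2 - x1) * (yh - y1) - (y2 - y1) * (xh - x1) : Int):ℚ) < 0 := by
              rw [i4]; exact mul_neg_of_pos_of_neg hpos (by linarith)
            exact_mod_cast hq
      have hcross2 : min tly thy ≤ max tlx thx := by
        by_contra hcon; push_neg at hcon
        have d11 : 0 < tly - tlx := by linarith [min_le_left tly thy, le_max_left tlx thx]
        have d21 : 0 < thy - tlx := by linarith [min_le_right tly thy, le_max_left tlx thx]
        have d12 : 0 < tly - thx := by linarith [min_le_left tly thy, le_max_right tlx thx]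
        have d22 : 0 < thy - thx := by linarith [min_le_right tly thy, le_max_right tlx thx]
        rcases lt_or_gt_of_ne (mul_ne_zero hdxq hdyq) with hneg | hpos
        · apply hs; right
          refine ⟨?_, ?_, ?_, ?_⟩
          · have hq : (((x2 - x1) * (yl - y1) - (y2 - y1) * (xl - x1) : Int):ℚ) < 0 := by
              rw [i1]; exact mul_neg_of_neg_of_pos hneg (by linarith)
            exact_mod_cast hq
          · have hq : (((x2 - x1) * (yh - y1) - (y2 - y1) * (xl - x1) : Int):ℚ) < 0 := by
              rw [i2]; exact mul_neg_of_neg_of_pos hneg (by linarith)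
            exact_mod_cast hq
          · have hq : (((x2 - x1) * (yl - y1) - (y2 - y1) * (xh - x1) : Int):ℚ) < 0 := by
              rw [i3]; exact mul_neg_of_neg_of_pos hneg (by linarith)
            exact_mod_cast hq
          · have hq : (((x2 - x1) * (yh - y1) - (y2 - y1) * (xh - x1) : Int):ℚ) < 0 := by
              rw [i4]; exact mul_neg_of_neg_of_pos hneg (by linarith)
            exact_mod_cast hq
        · apply hs; left
          refine ⟨?_, ?_, ?_, ?_⟩
          · have hq : (0:ℚ) < (((x2 - x1) * (yl - y1) - (y2 - y1) * (xl - x1) : Int):ℚ) := by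
              rw [i1]; exact mul_pos hpos (by linarith)
            exact_mod_cast hq
          · have hq : (0:ℚ) < (((x2 - x1) * (yh - y1) - (y2 - y1) * (xl - x1) : Int):ℚ) := by
              rw [i2]; exact mul_pos hpos (by linarith)
            exact_mod_cast hq
          · have hq : (0:ℚ) < (((x2 - x1) * (yl - y1) - (y2 - y1) * (xh - x1) : Int):ℚ) := by
              rw [i3]; exact mul_pos hpos (by linarith)
            exact_mod_cast hq
          · have hq : (0:ℚ) < (((x2 - x1) * (yh - y1) - (y2 - y1) * (xh - x1) : Int):ℚ) := by
              rw [i4]; exact mul_pos hpos (by linarith)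
            exact_mod_cast hq
      have hT00 : (0:ℚ) ≤ max 0 (max (min tlx thx) (min tly thy)) := le_max_left _ _
      have hT0x1 : min tlx thx ≤ max 0 (max (min tlx thx) (min tly thy)) :=
        le_trans (le_max_left _ _) (le_max_right _ _)
      have hT0y1 : min tly thy ≤ max 0 (max (min tlx thx) (min tly thy)) :=
        le_trans (le_max_right _ _) (le_max_right _ _)
      have hT0hix : max 0 (max (min tlx thx) (min tly thy)) ≤ max tlx thx :=
        max_le hmaxx (max_le min_le_max hcross2)
      have hT0hiy : max 0 (max (min tlx thx) (min tly thy)) ≤ max tly thy :=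
        max_le hmaxy (max_le hcross1 min_le_max)
      have hT01 : max 0 (max (min tlx thx) (min tly thy)) ≤ 1 :=
        max_le zero_le_one (max_le hminx hminy)
      have hpx := (hiffx (max 0 (max (min tlx thx) (min tly thy)))).mpr ⟨hT0x1, hT0hix⟩
      have hpy := (hiffy (max 0 (max (min tlx thx) (min tly thy)))).mpr ⟨hT0y1, hT0hiy⟩
      rcases max_choice (0:ℚ) (max (min tlx thx) (min tly thy)) with hT | hT
      · rw [hT] at hpx hpy
        simp only [zero_mul, add_zero] at hpx hpy
        unfold KProp InBox
        left
        exact ⟨by exact_mod_cast hpx.1, by exact_mod_cast hpx.2,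
               by exact_mod_cast hpy.1, by exact_mod_cast hpy.2⟩
      · rcases max_choice (min tlx thx) (min tly thy) with hT2 | hT2
        · have hTeq : max 0 (max (min tlx thx) (min tly thy)) = min tlx thx := hT.trans hT2
          rcases min_choice tlx thx with hT3 | hT3
          · have hXeq : (x1:ℚ) + (max 0 (max (min tlx thx) (min tly thy))) * ((x2:ℚ) - x1)
                = (xl:ℚ) := by
              rw [hTeq, hT3, htlx, div_mul_cancel₀ _ hdxq]; ring
            unfold KProp
            right; right; right; right; left
            exact ⟨max 0 (max (min tlx thx) (min tly thy)), hT00, hT01, hXeq, hpy.1, hpy.2⟩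
          · have hXeq : (x1:ℚ) + (max 0 (max (min tlx thx) (min tly thy))) * ((x2:ℚ) - x1)
                = (xh:ℚ) := by
              rw [hTeq, hT3, hthx, div_mul_cancel₀ _ hdxq]; ring
            unfold KProp
            right; right; right; right; right
            exact ⟨max 0 (max (min tlx thx) (min tly thy)), hT00, hT01, hXeq, hpy.1, hpy.2⟩
        · have hTeq : max 0 (max (min tlx thx) (min tly thy)) = min tly thy := hT.trans hT2
          rcases min_choice tly thy with hT3 | hT3
          · have hYeq : (y1:ℚ) + (max 0 (max (min tlx thx) (min tly thy))) * ((y2:ℚ) - y1)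
                = (yl:ℚ) := by
              rw [hTeq, hT3, htly, div_mul_cancel₀ _ hdyq]; ring
            unfold KProp
            right; right; left
            exact ⟨max 0 (max (min tlx thx) (min tly thy)), hT00, hT01, hYeq, hpx.1, hpx.2⟩
          · have hYeq : (y1:ℚ) + (max 0 (max (min tlx thx) (min tly thy))) * ((y2:ℚ) - y1)
                = (yh:ℚ) := by
              rw [hTeq, hT3, hthy, div_mul_cancel₀ _ hdyq]; ring
            unfold KProp
            right; right; right; left
            exact ⟨max 0 (max (min tlx thx) (min tly thy)), hT00, hT01, hYeq, hpx.1, hpx.2⟩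

theorem B_char (x1 y1 x2 y2 xl yl xh yh : Int) :
    ((if max x1 x2 < xl ∨ min x1 x2 > xh then false
      else if max y1 y2 < yl ∨ min y1 y2 > yh then false
      else
        !(([(xl, yl), (xl, yh), (xh, yl), (xh, yh)].map
            (fun c => (x2 - x1) * (c.2 - y1) - (y2 - y1) * (c.1 - x1))).all
              (fun v => decide (v > 0)) ||
          ([(xl, yl), (xl, yh), (xh, yl), (xh, yh)].map
            (fun c => (x2 - x1) * (c.2 - y1) - (y2 - y1) * (c.1 - x1))).all
              (fun v => decide (v < 0)))) = true) ↔
    ((xl ≤ max x1 x2 ∧ min x1 x2 ≤ xh) ∧ (yl ≤ max y1 y2 ∧ min y1 y2 ≤ yh) ∧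
    ¬((0 < (x2 - x1) * (yl - y1) - (y2 - y1) * (xl - x1) ∧
       0 < (x2 - x1) * (yh - y1) - (y2 - y1) * (xl - x1) ∧
       0 < (x2 - x1) * (yl - y1) - (y2 - y1) * (xh - x1) ∧
       0 < (x2 - x1) * (yh - y1) - (y2 - y1) * (xh - x1)) ∨
      ((x2 - x1) * (yl - y1) - (y2 - y1) * (xl - x1) < 0 ∧
       (x2 - x1) * (yh - y1) - (y2 - y1) * (xl - x1) < 0 ∧
       (x2 - x1) * (yl - y1) - (y2 - y1) * (xh - x1) < 0 ∧
       (x2 - x1) * (yh - y1) - (y2 - y1) * (xh - x1) < 0))) := by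
  have e1 : (([(xl, yl), (xl, yh), (xh, yl), (xh, yh)].map
      (fun c => (x2 - x1) * (c.2 - y1) - (y2 - y1) * (c.1 - x1))).all
        (fun v => decide (v > 0)) = true) ↔
      (0 < (x2 - x1) * (yl - y1) - (y2 - y1) * (xl - x1) ∧
       0 < (x2 - x1) * (yh - y1) - (y2 - y1) * (xl - x1) ∧
       0 < (x2 - x1) * (yl - y1) - (y2 - y1) * (xh - x1) ∧
       0 < (x2 - x1) * (yh - y1) - (y2 - y1) * (xh - x1)) := by
    simp [List.all_cons]
  have e2 : (([(xl, yl), (xl, yh), (xh, yl), (xh, yh)].map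
      (fun c => (x2 - x1) * (c.2 - y1) - (y2 - y1) * (c.1 - x1))).all
        (fun v => decide (v < 0)) = true) ↔
      ((x2 - x1) * (yl - y1) - (y2 - y1) * (xl - x1) < 0 ∧
       (x2 - x1) * (yh - y1) - (y2 - y1) * (xl - x1) < 0 ∧
       (x2 - x1) * (yl - y1) - (y2 - y1) * (xh - x1) < 0 ∧
       (x2 - x1) * (yh - y1) - (y2 - y1) * (xh - x1) < 0) := by
    simp [List.all_cons]
  split_ifs with h1 h2
  · constructor
    · intro h; exact absurd h (by simp)
    · intro hr; exfalso
      obtain ⟨⟨a, b⟩, -, -⟩ := hr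
      omega
  · constructor
    · intro h; exact absurd h (by simp)
    · intro hr; exfalso
      obtain ⟨-, ⟨c, d⟩, -⟩ := hr
      omega
  · constructor
    · intro h
      refine ⟨⟨by omega, by omega⟩, ⟨by omega, by omega⟩, ?_⟩
      intro hPQ
      simp only [Bool.not_eq_true', Bool.or_eq_false_iff] at h
      rcases hPQ with hP | hP
      · have hT := e1.mpr hP
        rw [h.1] at hT
        exact absurd hT (by simp)
      · have hT := e2.mpr hP
        rw [h.2] at hT
        exact absurd hT (by simp)
    · rintro ⟨-, -, hne⟩
      simp only [Bool.not_eq_true', Bool.or_eq_false_iff]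
      constructor
      · rcases Bool.eq_false_or_eq_true (([(xl, yl), (xl, yh), (xh, yl), (xh, yh)].map
          (fun c => (x2 - x1) * (c.2 - y1) - (y2 - y1) * (c.1 - x1))).all
            (fun v => decide (v > 0))) with hb | hb
        · exact absurd (Or.inl (e1.mp hb)) hne
        · exact hb
      · rcases Bool.eq_false_or_eq_true (([(xl, yl), (xl, yh), (xh, yl), (xh, yh)].map
          (fun c => (x2 - x1) * (c.2 - y1) - (y2 - y1) * (c.1 - x1))).all
            (fun v => decide (v < 0))) with hb | hb
        · exact absurd (Or.inr (e2.mp hb)) hne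
        · exact hb

-- ===== VERDICT (by name: the statement is the Claim_ definition above) =====
theorem line_rect_intersects_spec : Claim_equal_line_rect_intersects := by
  intro x1 y1 x2 y2 rx ry rw rh pad _hdom hpre
  obtain ⟨hw, hh⟩ := hpre
  unfold Spec_line_rect_intersects
  have hx : rx - pad ≤ rx - pad + (rw + 2 * pad) := by linarith
  have hy : ry - pad ≤ ry - pad + (rh + 2 * pad) := by linarith
  have hAK : line_rect_intersects x1 y1 x2 y2 rx ry rw rh pad = true ↔
      KProp x1 y1 x2 y2 (rx - pad) (ry - pad) (rx - pad + (rw + 2 * pad))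
        (ry - pad + (rh + 2 * pad)) :=
    A_char x1 y1 x2 y2 (rx - pad) (ry - pad) (rx - pad + (rw + 2 * pad))
      (ry - pad + (rh + 2 * pad)) hx hy
  have hBK : line_rect_intersects_alt x1 y1 x2 y2 rx ry rw rh pad = true ↔
      ((rx - pad ≤ max x1 x2 ∧ min x1 x2 ≤ rx - pad + (rw + 2 * pad)) ∧
       (ry - pad ≤ max y1 y2 ∧ min y1 y2 ≤ ry - pad + (rh + 2 * pad)) ∧
      ¬((0 < (x2 - x1) * ((ry - pad) - y1) - (y2 - y1) * ((rx - pad) - x1) ∧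
         0 < (x2 - x1) * ((ry - pad + (rh + 2 * pad)) - y1) - (y2 - y1) * ((rx - pad) - x1) ∧
         0 < (x2 - x1) * ((ry - pad) - y1) - (y2 - y1) * ((rx - pad + (rw + 2 * pad)) - x1) ∧
         0 < (x2 - x1) * ((ry - pad + (rh + 2 * pad)) - y1) - (y2 - y1) * ((rx - pad + (rw + 2 * pad)) - x1)) ∨
        ((x2 - x1) * ((ry - pad) - y1) - (y2 - y1) * ((rx - pad) - x1) < 0 ∧
         (x2 - x1) * ((ry - pad + (rh + 2 * pad)) - y1) - (y2 - y1) * ((rx - pad) - x1) < 0 ∧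
         (x2 - x1) * ((ry - pad) - y1) - (y2 - y1) * ((rx - pad + (rw + 2 * pad)) - x1) < 0 ∧
         (x2 - x1) * ((ry - pad + (rh + 2 * pad)) - y1) - (y2 - y1) * ((rx - pad + (rw + 2 * pad)) - x1) < 0))) :=
    B_char x1 y1 x2 y2 (rx - pad) (ry - pad) (rx - pad + (rw + 2 * pad))
      (ry - pad + (rh + 2 * pad))
  have hiff : (line_rect_intersects x1 y1 x2 y2 rx ry rw rh pad = true) ↔
      (line_rect_intersects_alt x1 y1 x2 y2 rx ry rw rh pad = true) := by
    rw [hAK, hBK]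
    constructor
    · intro hk
      exact K_to_B x1 y1 x2 y2 (rx - pad) (ry - pad) (rx - pad + (rw + 2 * pad))
        (ry - pad + (rh + 2 * pad)) hx hy hk
    · rintro ⟨⟨c1, c2⟩, ⟨c3, c4⟩, hsc⟩
      exact B_to_K x1 y1 x2 y2 (rx - pad) (ry - pad) (rx - pad + (rw + 2 * pad))
        (ry - pad + (rh + 2 * pad)) hx hy c1 c2 c3 c4 hsc
  cases hA' : line_rect_intersects x1 y1 x2 y2 rx ry rw rh pad with
  | true => exact (hiff.mp hA').symm
  | false =>
    cases hB' : line_rect_intersects_alt x1 y1 x2 y2 rx ry rw rh pad with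
    | false => rfl
    | true =>
      rw [hiff.mpr hB'] at hA'
      exact absurd hA' (by simp)
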